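-- pv_equiv track=rewrite | github.com/DarkFoxGnS/PythonHabitManager | Analytics.py | computeCompletedStreak
-- ===== SOURCE A (Python) =====
-- def computeCompletedStreak(history_):
--     """
--     Inputs history_ list of a Task, in the form of [id, success, deadline,date]
--     Returns the largest streak of successed tasks in the history.
--     """
--     streak = 0
--     highestStreak = 0
--     for history in history_:
--         if history[1] == 1:
--             streak +=1
--         else:
--             streak = 0
--         if streak > highestStreak:
--             highestStreak = streak
--
--     return highestStreak
-- ===== SOURCE B (Python) =====
-- def computeCompletedStreak(history_):
--     """
--     Inputs history_ list of a Task, in the form of [id, success, deadline,date]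
--     Returns the largest streak of successed tasks in the history.
--     """
--     if not history_:
--         return 0
--     if history_[0][1] == 1:
--         run = 1
--         while run < len(history_) and history_[run][1] == 1:
--             run += 1
--         return max(run, computeCompletedStreak(history_[run:]))
--     return computeCompletedStreak(history_[1:])
-- ===== Notes on version B (the rewrite author's own statement) =====
-- stated objective: alternative
-- what changed: Replaced the running-counter/highest-so-far fold with a recursive run decomposition: measure the leading success run, then recurse past it and take the max of the run lengths.
import Mathlib
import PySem

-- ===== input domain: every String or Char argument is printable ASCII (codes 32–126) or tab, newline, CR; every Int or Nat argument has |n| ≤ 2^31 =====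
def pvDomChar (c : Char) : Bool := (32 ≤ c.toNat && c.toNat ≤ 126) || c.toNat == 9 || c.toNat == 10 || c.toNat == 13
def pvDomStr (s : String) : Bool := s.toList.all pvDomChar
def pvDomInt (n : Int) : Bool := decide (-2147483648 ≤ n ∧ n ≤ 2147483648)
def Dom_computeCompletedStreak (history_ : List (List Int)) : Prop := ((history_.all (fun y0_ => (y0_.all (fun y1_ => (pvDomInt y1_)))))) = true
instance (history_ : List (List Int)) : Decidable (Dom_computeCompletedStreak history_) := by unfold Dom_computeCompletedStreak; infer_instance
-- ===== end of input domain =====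

-- B replaces A's running-counter fold by a recursive run decomposition (objective: alternative, same cost).

-- ===== PORT A =====
-- A: one pass keeping (streak, highestStreak); history[1] ported with pyGet? (none compares ≠ 1, excluded by Pre_).
def computeCompletedStreak (history_ : List (List Int)) : Int :=
  (history_.foldl
    (fun (st : Int × Int) history =>
      let streak := if PySem.List.pyGet? history 1 == some (1 : Int) then st.1 + 1 else (0 : Int)
      let highestStreak := if streak > st.2 then streak else st.2
      (streak, highestStreak))
    (0, 0)).2

-- ===== PORT B =====
-- length of the leading run of successes (B's while loop counting from index `run`)
def pvLead (l : List (List Int)) : Nat :=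
  match l with
  | [] => 0
  | h :: t => if PySem.List.pyGet? h 1 == some (1 : Int) then pvLead t + 1 else 0

def computeCompletedStreak_alt (history_ : List (List Int)) : Int :=
  match history_ with
  | [] => 0
  | h :: t =>
    if PySem.List.pyGet? h 1 == some (1 : Int) then
      let run : Nat := 1 + pvLead t
      max (run : Int) (computeCompletedStreak_alt (t.drop (pvLead t)))
    else
      computeCompletedStreak_alt t
termination_by history_.length
decreasing_by
  all_goals simp [List.length_drop]

-- ===== PRECONDITION & SPEC =====
-- Pre_ excludes inputs on which Python A raises IndexError: a row with fewer than 2 elements.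
def Pre_computeCompletedStreak (history_ : List (List Int)) : Prop :=
  ∀ row ∈ history_, 2 ≤ row.length
instance (history_ : List (List Int)) : Decidable (Pre_computeCompletedStreak history_) := by
  unfold Pre_computeCompletedStreak; infer_instance
def pvWitness_computeCompletedStreak : List (List Int) := [[0, 1, 5, 6], [1, 0, 5, 6], [2, 1, 5, 6]]

def Spec_computeCompletedStreak (history_ : List (List Int)) (out : Int) : Prop := out = computeCompletedStreak_alt history_
instance (history_ : List (List Int)) (out : Int) : Decidable (Spec_computeCompletedStreak history_ out) := by unfold Spec_computeCompletedStreak; infer_instance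

-- ===== CLAIM (what is proved, stated in full; the proofs are below) =====
def Claim_equal_computeCompletedStreak : Prop := ∀ (history_ : List (List Int)), Dom_computeCompletedStreak history_ → Pre_computeCompletedStreak history_ → Spec_computeCompletedStreak history_ (computeCompletedStreak history_)

-- ===== LEMMAS AND PROOFS =====

lemma alt_nil : computeCompletedStreak_alt [] = 0 := by
  rw [computeCompletedStreak_alt]

lemma alt_cons (h : List Int) (t : List (List Int)) :
    computeCompletedStreak_alt (h :: t) =
      if PySem.List.pyGet? h 1 == some (1 : Int) then
        max ((1 + pvLead t : Nat) : Int) (computeCompletedStreak_alt (t.drop (pvLead t)))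
      else computeCompletedStreak_alt t := by
  rw [computeCompletedStreak_alt]

-- the body of A's fold, named for the proofs
def pvStep (st : Int × Int) (history : List Int) : Int × Int :=
  let streak := if PySem.List.pyGet? history 1 == some (1 : Int) then st.1 + 1 else (0 : Int)
  let highestStreak := if streak > st.2 then streak else st.2
  (streak, highestStreak)

lemma pvStep_fold (history_ : List (List Int)) :
    computeCompletedStreak history_ = (history_.foldl pvStep (0, 0)).2 := rfl

-- A's fold across the leading success run: streak grows by pvLead, highest takes the max.
lemma foldl_run (t : List (List Int)) : ∀ (s hb : Int), s ≤ hb →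
    t.foldl pvStep (s, hb) =
      (t.drop (pvLead t)).foldl pvStep (s + pvLead t, max hb (s + pvLead t)) := by
  induction t with
  | nil => intro s hb h; simp [pvLead, max_eq_left h]
  | cons h t ih =>
    intro s hb hsb
    by_cases hc : PySem.List.pyGet? h 1 == some (1 : Int)
    · have := ih (s + 1) (max hb (s + 1)) (le_max_right _ _)
      simp only [pvLead, hc, if_true, List.foldl_cons, List.drop_succ_cons, pvStep]
      rw [show (if s + 1 > hb then s + 1 else hb) = max hb (s + 1) by
        simp [max_def]; omega]
      rw [this]
      have e2 : max (max hb (s + 1)) (s + 1 + (pvLead t : Int)) = max hb (s + ((pvLead t + 1 : Nat) : Int)) := by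
        push_cast; omega
      rw [e2, show s + 1 + (pvLead t : Int) = s + ((pvLead t + 1 : Nat) : Int) by push_cast; ring]
    · simp [pvLead, hc, max_eq_left hsb]

-- alt is nonnegative
lemma alt_nonneg (l : List (List Int)) : 0 ≤ computeCompletedStreak_alt l := by
  fun_induction computeCompletedStreak_alt l with
  | case1 => simp
  | case2 h t hc run ih =>
    exact le_max_of_le_left (by positivity)
  | case3 h t hc ih => exact ih

-- main invariant: A's fold from (0, hb) computes max hb (alt l)
lemma fold_eq_alt (l : List (List Int)) : ∀ hb : Int, 0 ≤ hb →
    (l.foldl pvStep (0, hb)).2 = max hb (computeCompletedStreak_alt l) := by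
  fun_induction computeCompletedStreak_alt l with
  | case1 => intro hb h; simp [max_eq_left h]
  | case2 h t hc run ih =>
    intro hb hnn
    have hrun := foldl_run (h :: t) 0 hb hnn
    simp only [pvLead, hc, if_true, List.drop_succ_cons, zero_add] at hrun
    rw [hrun, show run = 1 + pvLead t from rfl]
    rcases hd : t.drop (pvLead t) with _ | ⟨r, rest⟩
    · simp only [List.foldl_nil]
      rw [alt_nil, max_eq_left (by positivity : (0:Int) ≤ ((1 + pvLead t : Nat) : Int))]
      congr 1
      omega
    · -- head of the remainder is a failure row: pvLead stopped there
      have hr : ¬ (PySem.List.pyGet? r 1 == some (1 : Int)) = true := by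
        -- pvLead counts the maximal success prefix, so the element after it is not a success
        clear hrun ih hc
        induction t generalizing r rest with
        | nil => simp [pvLead] at hd
        | cons x xs ihx =>
          by_cases hx : PySem.List.pyGet? x 1 == some (1 : Int)
          · simp only [pvLead, hx, if_true, List.drop_succ_cons] at hd
            exact ihx r rest hd
          · simp only [pvLead, hx] at hd
            cases hd; simpa using hx
      have hM : (0:Int) ≤ max hb ((pvLead t + 1 : Nat) : Int) := le_max_of_le_left hnn
      have hfirst : pvStep (((pvLead t + 1 : Nat) : Int), max hb ((pvLead t + 1 : Nat) : Int)) r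
          = pvStep (0, max hb ((pvLead t + 1 : Nat) : Int)) r := by
        simp [pvStep, hr]
      have ih' := ih (max hb ((pvLead t + 1 : Nat) : Int)) hM
      rw [hd] at ih'
      rw [List.foldl_cons, hfirst, ← List.foldl_cons, ih',
          alt_cons, if_neg (by simpa using hr), max_assoc]
      congr 2
      omega
  | case3 h t hc ih =>
    intro hb hnn
    have : pvStep (0, hb) h = (0, hb) := by
      simp only [pvStep, hc]
      simp [show ¬ ((0:Int) > hb) by omega]
    rw [List.foldl_cons, this, ih hb hnn]

-- ===== VERDICT (by name: the statement is the Claim_ definition above) =====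
theorem computeCompletedStreak_spec : Claim_equal_computeCompletedStreak := by
  intro history_ _ _
  unfold Spec_computeCompletedStreak
  rw [pvStep_fold, fold_eq_alt history_ 0 le_rfl,
      max_eq_right (alt_nonneg history_)]
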